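-- pv_equiv track=rewrite | github.com/NathanGros/Advent-of-Code | aoc_2024/day21__/1.py | digitalCode
-- ===== SOURCE A (Python) =====
-- def digitalCode(s, pos):
--     code = list(s)
--     [y1, x1] = pos
--     inputList = [""]
--     for digit in code:
--         match digit:
--             case 'A':
--                 y2, x2 = 3, 2
--             case '0':
--                 y2, x2 = 3, 1
--             case '1':
--                 y2, x2 = 2, 0
--             case '2':
--                 y2, x2 = 2, 1
--             case '3':
--                 y2, x2 = 2, 2
--             case '4':
--                 y2, x2 = 1, 0
--             case '5':
--                 y2, x2 = 1, 1
--             case '6':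
--                 y2, x2 = 1, 2
--             case '7':
--                 y2, x2 = 0, 0
--             case '8':
--                 y2, x2 = 0, 1
--             case '9':
--                 y2, x2 = 0, 2
--         #if there is a hole on the path avoid it
--         if y1 == 3 and x2 == 0:
--             for i in range(len(inputList)):
--                 for j in range(y1 - y2):
--                     inputList[i] += '^'
--                 for j in range(x1 - x2):
--                     inputList[i] += '<'
--                 inputList[i] += 'A'
--         elif x1 == 0 and y2 == 3:
--             for i in range(len(inputList)):
--                 for j in range(x2 - x1):
--                     inputList[i] += '>'
--                 for j in range(y2 - y1):
--                     inputList[i] += 'v'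
--                 inputList[i] += 'A'
--         #if there is no hole then multiply path in both directions
--         else:
--             for i in range(len(inputList)):
--                 s = inputList[i]
--                 if y2 > y1:
--                     for j in range(y2 - y1):
--                         s += 'v'
--                     if x2 > x1:
--                         for j in range(x2 - x1):
--                             inputList[i] += '>'
--                             s += '>'
--                     else:
--                         for j in range(x1 - x2):
--                             inputList[i] += '<'
--                             s += '<'
--                     for j in range(y2 - y1):
--                         inputList[i] += 'v'
--                 else:
--                     for j in range(y1 - y2):
--                         inputList[i] += '^'
--                     if x2 > x1:
--                         for j in range(x2 - x1):
--                             inputList[i] += '>'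
--                             s += '>'
--                     else:
--                         for j in range(x1 - x2):
--                             inputList[i] += '<'
--                             s += '<'
--                     for j in range(y1 - y2):
--                         s += '^'
--                 inputList.append(s + 'A')
--                 inputList[i] += 'A'
--         x1, y1 = x2, y2
--     return list(dict.fromkeys(inputList))
-- ===== SOURCE B (Python) =====
-- KEYPAD = {'A': (3, 2), '0': (3, 1),
--           '1': (2, 0), '2': (2, 1), '3': (2, 2),
--           '4': (1, 0), '5': (1, 1), '6': (1, 2),
--           '7': (0, 0), '8': (0, 1), '9': (0, 2)}
--
-- def digitalCode(s, pos):
--     [y1, x1] = pos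
--     # one pass over the code: per key, the list of keystroke segments,
--     # first entry = the ordering A applies in place, second = the alternate
--     options = []
--     for digit in s:
--         y2, x2 = KEYPAD[digit]
--         up = '^' * (y1 - y2)
--         down = 'v' * (y2 - y1)
--         horiz = '>' * (x2 - x1) if x2 > x1 else '<' * (x1 - x2)
--         if y1 == 3 and x2 == 0:
--             options.append([up + '<' * (x1 - x2) + 'A'])
--         elif x1 == 0 and y2 == 3:
--             options.append(['>' * (x2 - x1) + down + 'A'])
--         elif y2 > y1:
--             options.append([horiz + down + 'A', down + horiz + 'A'])
--         else:
--             options.append([up + horiz + 'A', horiz + up + 'A'])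
--         y1, x1 = y2, x2
--     # mixed-radix assembly: the first key's choice varies fastest
--     total = 1
--     for opt in options:
--         total *= len(opt)
--     result = []
--     for idx in range(total):
--         k = idx
--         parts = []
--         for opt in options:
--             parts.append(opt[k % len(opt)])
--             k //= len(opt)
--         result.append(''.join(parts))
--     return list(dict.fromkeys(result))
-- ===== Notes on version B (the rewrite author's own statement) =====
-- stated objective: alternative
-- what changed: A grows one result list in place, doubling it key by key with character-by-character '+=' loops; B makes one pass building each key's move-segment options and then assembles all strings by a mixed-radix index decode (first key's choice varies fastest) before the same ordered dedup; Pre_ excludes pos of length other than 2 (ValueError) and codes with characters off the keypad, where A raises UnboundLocalError or reuses stale loop state while B's dict lookup raises KeyError.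
-- outside the precondition, e.g. on digitalCode('5X', [3, 2]): A returns ['^^<AA', '<^^AA'], B raises KeyError
import Mathlib
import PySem

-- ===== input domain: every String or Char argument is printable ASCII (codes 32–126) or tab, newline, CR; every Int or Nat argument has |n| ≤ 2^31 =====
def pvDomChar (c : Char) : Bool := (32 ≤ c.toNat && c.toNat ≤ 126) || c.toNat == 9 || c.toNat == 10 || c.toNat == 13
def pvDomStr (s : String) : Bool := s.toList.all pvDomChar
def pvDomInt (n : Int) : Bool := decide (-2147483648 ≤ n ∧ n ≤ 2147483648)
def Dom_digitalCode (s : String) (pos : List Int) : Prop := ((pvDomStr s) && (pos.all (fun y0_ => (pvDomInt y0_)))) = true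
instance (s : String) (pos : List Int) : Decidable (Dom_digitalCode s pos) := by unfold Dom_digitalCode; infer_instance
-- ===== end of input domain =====

-- B replaces A's per-key in-place doubling of the result list (char-by-char '+=') by one pass
-- building each key's move-segment options and a mixed-radix cartesian assembly; objective: alternative.


-- ===== PORT A =====
-- 'c' * n (empty for n ≤ 0)
def digitalCodeRep (c : Char) (n : Int) : List Char := PySem.List.pyRepeat [c] n

-- the match statement; chars outside the pad leave y2/x2 unbound or stale in Python and are excluded by Pre_
def digitalCodeKey (c : Char) : Int × Int :=
  if c = 'A' then (3, 2)
  else if c = '0' then (3, 1)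
  else if c = '1' then (2, 0)
  else if c = '2' then (2, 1)
  else if c = '3' then (2, 2)
  else if c = '4' then (1, 0)
  else if c = '5' then (1, 1)
  else if c = '6' then (1, 2)
  else if c = '7' then (0, 0)
  else if c = '8' then (0, 1)
  else (0, 2)

-- one iteration of A's outer loop; the index loop runs over the ORIGINAL length while appending,
-- so it is rendered as 'map of the in-place updates ++ map of the appended variants'
def digitalCodeStep (st : Int × Int × List (List Char)) (digit : Char) : Int × Int × List (List Char) :=
  let y1 := st.1; let x1 := st.2.1; let inputList := st.2.2
  let yx := digitalCodeKey digit
  let y2 := yx.1; let x2 := yx.2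
  let il :=
    if y1 = 3 ∧ x2 = 0 then
      inputList.map (fun t => t ++ digitalCodeRep '^' (y1 - y2) ++ digitalCodeRep '<' (x1 - x2) ++ ['A'])
    else if x1 = 0 ∧ y2 = 3 then
      inputList.map (fun t => t ++ digitalCodeRep '>' (x2 - x1) ++ digitalCodeRep 'v' (y2 - y1) ++ ['A'])
    else if y2 > y1 then
      inputList.map (fun t => t ++ (if x2 > x1 then digitalCodeRep '>' (x2 - x1) else digitalCodeRep '<' (x1 - x2)) ++ digitalCodeRep 'v' (y2 - y1) ++ ['A'])
        ++ inputList.map (fun t => t ++ digitalCodeRep 'v' (y2 - y1) ++ (if x2 > x1 then digitalCodeRep '>' (x2 - x1) else digitalCodeRep '<' (x1 - x2)) ++ ['A'])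
    else
      inputList.map (fun t => t ++ digitalCodeRep '^' (y1 - y2) ++ (if x2 > x1 then digitalCodeRep '>' (x2 - x1) else digitalCodeRep '<' (x1 - x2)) ++ ['A'])
        ++ inputList.map (fun t => t ++ (if x2 > x1 then digitalCodeRep '>' (x2 - x1) else digitalCodeRep '<' (x1 - x2)) ++ digitalCodeRep '^' (y1 - y2) ++ ['A'])
  (y2, x2, il)

def digitalCode (s : String) (pos : List Int) : List String :=
  match pos with
  | [y1, x1] =>
    let st := s.toList.foldl digitalCodeStep (y1, x1, ([[]] : List (List Char)))
    PySem.List.dedup (st.2.2.map String.ofList)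
  | _ => []   -- '[y1, x1] = pos' raises ValueError on any other length; excluded by Pre_

-- ===== PORT B =====
-- 'c' * n (empty for n ≤ 0)
def altRep (c : Char) (n : Int) : List Char := PySem.List.pyRepeat [c] n

def altKeypad : PySem.Dict Char (Int × Int) :=
  PySem.Dict.ofList [('A', (3, 2)), ('0', (3, 1)), ('1', (2, 0)), ('2', (2, 1)), ('3', (2, 2)),
   ('4', (1, 0)), ('5', (1, 1)), ('6', (1, 2)), ('7', (0, 0)), ('8', (0, 1)), ('9', (0, 2))]

-- the per-key option list (the branch bodies of Source B's first loop)
def altOptionFor (y1 x1 y2 x2 : Int) : List (List Char) :=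
  let up := altRep '^' (y1 - y2)
  let down := altRep 'v' (y2 - y1)
  let horiz := if x2 > x1 then altRep '>' (x2 - x1) else altRep '<' (x1 - x2)
  if y1 = 3 ∧ x2 = 0 then [up ++ altRep '<' (x1 - x2) ++ ['A']]
  else if x1 = 0 ∧ y2 = 3 then [altRep '>' (x2 - x1) ++ down ++ ['A']]
  else if y2 > y1 then [horiz ++ down ++ ['A'], down ++ horiz ++ ['A']]
  else [up ++ horiz ++ ['A'], horiz ++ up ++ ['A']]

-- Source B's first loop: one option entry per key (KEYPAD[digit] raises KeyError off the pad; excluded by Pre_)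
def altOptions (cs : List Char) (y1 x1 : Int) : List (List (List Char)) :=
  match cs with
  | [] => []
  | d :: rest =>
    let yx := (PySem.Dict.get? altKeypad d).getD (0, 0)
    altOptionFor y1 x1 yx.1 yx.2 :: altOptions rest yx.1 yx.2

-- Source B's inner decode loop: parts for one mixed-radix index
def altDecode (opts : List (List (List Char))) (k : Int) : List (List Char) :=
  match opts with
  | [] => []
  | o :: rest =>
    PySem.List.pyGetD o (PySem.Int.mod k (PySem.List.len o)) []
      :: altDecode rest (PySem.Int.floordiv k (PySem.List.len o))

def digitalCode_alt (s : String) (pos : List Int) : List String :=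
  -- '[y1, x1] = pos' raises ValueError unless the length is exactly 2; excluded by Pre_
  if pos.length = 2 then
    let y1 := pos[0]!; let x1 := pos[1]!
    let opts := altOptions s.toList y1 x1
    let total := opts.foldl (fun t o => t * PySem.List.len o) 1
    let result := (PySem.List.pyRange 0 total 1).map
      (fun idx => String.ofList (PySem.Chars.join [] (altDecode opts idx)))
    PySem.List.dedup result
  else []

-- ===== PRECONDITION & SPEC =====
-- Pre_ excludes pos of length ≠ 2 (A raises ValueError) and codes with a character off the keypad:
-- there A raises UnboundLocalError if it is the first character, and otherwise returns a value produced
-- by the stale y2/x2 of the previous key (leftover loop state), while B's dict lookup raises KeyError.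
def Pre_digitalCode (s : String) (pos : List Int) : Prop :=
  pos.length = 2 ∧ (s.toList.all (fun c => c == 'A' || c == '0' || c == '1' || c == '2' ||
    c == '3' || c == '4' || c == '5' || c == '6' || c == '7' || c == '8' || c == '9')) = true
instance (s : String) (pos : List Int) : Decidable (Pre_digitalCode s pos) := by
  unfold Pre_digitalCode; infer_instance

def pvWitness_digitalCode : String × List Int := ("029A", [3, 2])

def Spec_digitalCode (s : String) (pos : List Int) (out : List String) : Prop := out = digitalCode_alt s pos
instance (s : String) (pos : List Int) (out : List String) : Decidable (Spec_digitalCode s pos out) := by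
  unfold Spec_digitalCode; infer_instance

-- ===== CLAIM (what is proved, stated in full; the proofs are below) =====
def Claim_equal_digitalCode : Prop := ∀ (s : String) (pos : List Int), Dom_digitalCode s pos → Pre_digitalCode s pos → Spec_digitalCode s pos (digitalCode s pos)

-- ===== LEMMAS AND PROOFS =====

-- proof-side helpers
def enumStep (acc o : List (List Char)) : List (List Char) :=
  o.flatMap (fun seg => acc.map (· ++ seg))

def optsOf (cs : List Char) (y1 x1 : Int) : List (List (List Char)) :=
  match cs with
  | [] => []
  | d :: rest =>
    altOptionFor y1 x1 (digitalCodeKey d).1 (digitalCodeKey d).2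
      :: optsOf rest (digitalCodeKey d).1 (digitalCodeKey d).2

def decN (opts : List (List (List Char))) (k : Nat) : List (List Char) :=
  match opts with
  | [] => []
  | o :: rest => o.getD (k % o.length) [] :: decN rest (k / o.length)

def prodLen (opts : List (List (List Char))) : Nat := (opts.map List.length).prod

lemma mem_of_keyChar {c : Char}
    (h : (c == 'A' || c == '0' || c == '1' || c == '2' || c == '3' || c == '4' || c == '5' ||
      c == '6' || c == '7' || c == '8' || c == '9') = true) :
    c ∈ ['A', '0', '1', '2', '3', '4', '5', '6', '7', '8', '9'] := by
  simp at h ⊢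
  tauto

lemma key_agree (c : Char)
    (hc : c ∈ ['A', '0', '1', '2', '3', '4', '5', '6', '7', '8', '9']) :
    (PySem.Dict.get? altKeypad c).getD (0, 0) = digitalCodeKey c := by
  fin_cases hc <;> decide

lemma stepA_eq (y1 x1 : Int) (L : List (List Char)) (d : Char) :
    digitalCodeStep (y1, x1, L) d =
      ((digitalCodeKey d).1, (digitalCodeKey d).2,
        enumStep L (altOptionFor y1 x1 (digitalCodeKey d).1 (digitalCodeKey d).2)) := by
  simp only [digitalCodeStep, altOptionFor, enumStep]
  split_ifs <;> simp [digitalCodeRep, altRep, List.append_assoc]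
lemma optsOf_eq_altOptions (cs : List Char) (y1 x1 : Int)
    (h : ∀ c ∈ cs, c ∈ ['A', '0', '1', '2', '3', '4', '5', '6', '7', '8', '9']) :
    altOptions cs y1 x1 = optsOf cs y1 x1 := by
  induction cs generalizing y1 x1 with
  | nil => simp [altOptions, optsOf]
  | cons d rest ih =>
    have hd := h d (by simp)
    simp only [altOptions, optsOf, key_agree d hd]
    exact congrArg _ (ih _ _ (fun c hc => h c (by simp [hc])))

lemma foldA_eq (cs : List Char) (y1 x1 : Int) (L : List (List Char)) :
    (cs.foldl digitalCodeStep (y1, x1, L)).2.2 = (optsOf cs y1 x1).foldl enumStep L := by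
  induction cs generalizing y1 x1 L with
  | nil => rfl
  | cons d rest ih =>
    simp only [List.foldl_cons, stepA_eq, optsOf]
    exact ih _ _ _

lemma altOptionFor_ne_nil (y1 x1 y2 x2 : Int) : altOptionFor y1 x1 y2 x2 ≠ [] := by
  unfold altOptionFor; split_ifs <;> simp

lemma optsOf_ne_nil (cs : List Char) (y1 x1 : Int) :
    ∀ o ∈ optsOf cs y1 x1, o ≠ [] := by
  induction cs generalizing y1 x1 with
  | nil => simp [optsOf]
  | cons d rest ih =>
    simp only [optsOf, List.mem_cons]
    rintro o (rfl | ho)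
    · exact altOptionFor_ne_nil _ _ _ _
    · exact ih _ _ o ho

lemma join_nil_eq_flatten (l : List (List Char)) : PySem.Chars.join [] l = l.flatten := by
  induction l with
  | nil => rfl
  | cons a t ih =>
    cases t with
    | nil => simp [PySem.Chars.join, List.intercalate]
    | cons b t2 => simpa [PySem.Chars.join, List.intercalate] using ih

lemma altDecode_natCast (opts : List (List (List Char))) (hne : ∀ o ∈ opts, o ≠ []) (k : Nat) :
    altDecode opts (k : Int) = decN opts k := by
  induction opts generalizing k with
  | nil => rfl
  | cons o rest ih =>
    simp only [altDecode, decN, PySem.List.len_eq, PySem.Int.mod_natCast,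
      PySem.Int.floordiv_natCast, PySem.List.pyGetD_natCast]
    exact congrArg _ (ih (fun x hx => hne x (by simp [hx])) _)
lemma decN_mixed (opts : List (List (List Char))) (hne : ∀ o ∈ opts, o ≠ [])
    (j r : Nat) (hr : r < prodLen opts) :
    decN opts (j * prodLen opts + r) = decN opts r := by
  induction opts generalizing j r with
  | nil => rfl
  | cons o rest ih =>
    have hl : 0 < o.length := List.length_pos_iff.mpr (hne o (by simp))
    have hP : prodLen (o :: rest) = o.length * prodLen rest := by
      simp [prodLen]
    rw [hP] at hr ⊢
    have harg : j * (o.length * prodLen rest) + r = o.length * (j * prodLen rest) + r := by ring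
    simp only [decN, harg, Nat.mul_add_mod, Nat.mul_add_div hl]
    refine congrArg₂ _ rfl ?_
    exact ih (fun x hx => hne x (by simp [hx])) j (r / o.length)
      ((Nat.div_lt_iff_lt_mul hl).mpr (lt_of_lt_of_eq hr (Nat.mul_comm _ _)))
lemma resN_eq (opts : List (List (List Char))) (k : Nat) :
    (opts.foldl (fun k o => k / o.length) k) = k / prodLen opts := by
  induction opts generalizing k with
  | nil => simp [prodLen]
  | cons o rest ih =>
    simp only [List.foldl_cons, ih, prodLen, List.map_cons, List.prod_cons]
    exact Nat.div_div_eq_div_mul k o.length _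
lemma decN_append (opts : List (List (List Char))) (o : List (List Char)) (k : Nat) :
    decN (opts ++ [o]) k =
      decN opts k ++ [o.getD ((opts.foldl (fun k o => k / o.length) k) % o.length) []] := by
  induction opts generalizing k with
  | nil => rfl
  | cons p rest ih => simp [decN, ih]
lemma range_mul_flatMap (L m : Nat) :
    List.range (L * m) = (List.range m).flatMap (fun j => (List.range L).map (fun r => j * L + r)) := by
  induction m with
  | zero => simp
  | succ m ih =>
    rw [Nat.mul_succ, List.range_add, List.range_succ, ih]
    simp [Nat.mul_comm]
lemma map_getD_range (l : List (List Char)) :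
    (List.range l.length).map (fun j => l.getD j []) = l := by
  induction l with
  | nil => simp
  | cons a t ih =>
    rw [List.length_cons, List.range_succ_eq_map]
    simpa [List.map_map, Function.comp_def] using ih
lemma prodLen_pos (opts : List (List (List Char))) (hne : ∀ o ∈ opts, o ≠ []) :
    0 < prodLen opts := by
  refine List.prod_pos ?_
  intro x hx
  obtain ⟨o, ho, rfl⟩ := List.mem_map.mp hx
  exact List.length_pos_iff.mpr (hne o ho)

lemma enum_eq_decode (opts : List (List (List Char))) (hne : ∀ o ∈ opts, o ≠ []) :
    opts.foldl enumStep [[]] = (List.range (prodLen opts)).map (fun k => (decN opts k).flatten) := by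
  induction opts using List.reverseRecOn with
  | nil => simp [prodLen, decN]
  | append_singleton opts o ih =>
    have ho : o ≠ [] := hne o (by simp)
    have hne' : ∀ x ∈ opts, x ≠ [] := fun x hx => hne x (by simp [hx])
    have hm : 0 < o.length := List.length_pos_iff.mpr ho
    have hLpos : 0 < prodLen opts := prodLen_pos opts hne'
    have hP : prodLen (opts ++ [o]) = prodLen opts * o.length := by
      simp [prodLen]
    rw [List.foldl_append, List.foldl_cons, List.foldl_nil, ih hne', hP,
      range_mul_flatMap, enumStep]
    rw [List.map_flatMap]
    conv_lhs => rw [← map_getD_range o]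
    rw [List.flatMap_map, List.flatMap_def, List.flatMap_def]
    refine congrArg List.flatten (List.map_congr_left (fun j hj => ?_))
    have hjm : j < o.length := List.mem_range.mp hj
    simp only [List.map_map, Function.comp_def]
    refine List.map_congr_left (fun r hr => ?_)
    have hrL : r < prodLen opts := List.mem_range.mp hr
    have hdiv : (j * prodLen opts + r) / prodLen opts = j := by
      rw [mul_comm, Nat.mul_add_div hLpos, Nat.div_eq_of_lt hrL, Nat.add_zero]
    rw [decN_append, resN_eq, hdiv, Nat.mod_eq_of_lt hjm,
      decN_mixed opts hne' j r hrL, List.flatten_append]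
    simp
lemma total_eq' (opts : List (List (List Char))) (t : Int) :
    opts.foldl (fun t o => t * PySem.List.len o) t = t * (prodLen opts : Int) := by
  induction opts generalizing t with
  | nil => simp [prodLen]
  | cons o rest ih =>
    rw [List.foldl_cons, ih]
    simp only [prodLen, PySem.List.len_eq, List.map_cons, List.prod_cons]
    push_cast
    ring

lemma total_eq (opts : List (List (List Char))) :
    opts.foldl (fun t o => t * PySem.List.len o) 1 = (prodLen opts : Int) := by
  simpa using total_eq' opts 1

-- ===== VERDICT (by name: the statement is the Claim_ definition above) =====
theorem digitalCode_spec : Claim_equal_digitalCode := by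
  intro s pos _hdom hpre
  obtain ⟨hlen, hvalidB⟩ := hpre
  have hvalid : ∀ c ∈ s.toList, c ∈ ['A', '0', '1', '2', '3', '4', '5', '6', '7', '8', '9'] :=
    fun c hc => mem_of_keyChar (List.all_eq_true.mp hvalidB c hc)
  match pos, hlen with
  | [y1, x1], _ =>
    show PySem.List.dedup _ = digitalCode_alt _ _
    simp only [digitalCode_alt]
    rw [if_pos (by simp)]
    simp only [List.getElem!_cons_zero, List.getElem!_cons_succ]
    congr 1
    rw [foldA_eq, optsOf_eq_altOptions s.toList y1 x1 hvalid]
    have hne := optsOf_ne_nil s.toList y1 x1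
    rw [enum_eq_decode _ hne, total_eq, PySem.List.pyRange_one]
    have h0 : ((prodLen (optsOf s.toList y1 x1) : Int) - 0).toNat = prodLen (optsOf s.toList y1 x1) := by
      simp
    rw [h0]
    simp only [List.map_map, Function.comp_def, zero_add]
    exact List.map_congr_left (fun k hk => by
      rw [altDecode_natCast _ hne, join_nil_eq_flatten])
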